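-- pv_equiv track=rewrite | github.com/lionel319/dmx_main_gdpxl_py23_cth | lib/python/dmx/dmlib/deliverables/utils/General.py | _translateComment
-- ===== SOURCE A (Python) =====
-- def _translateComment (comment, fillCharacter, preserveNewLines):
--     ret = ''
--     for c in comment:
--         if c == '\n' and preserveNewLines:
--             ret += c
--         else:
--             ret += fillCharacter
--     return ret
-- ===== SOURCE B (Python) =====
-- def _translateComment(comment, fillCharacter, preserveNewLines):
--     if not preserveNewLines:
--         return fillCharacter * len(comment)
--     return '\n'.join([fillCharacter * len(seg) for seg in comment.split('\n')])
-- ===== Notes on version B (the rewrite author's own statement) =====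
-- stated objective: simpler
-- what changed: Replaces the per-character conditional append loop with string multiplication: fillCharacter * len(comment) when newlines are not preserved, otherwise split on '\n', multiply each segment, and join with '\n'.
import Mathlib
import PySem

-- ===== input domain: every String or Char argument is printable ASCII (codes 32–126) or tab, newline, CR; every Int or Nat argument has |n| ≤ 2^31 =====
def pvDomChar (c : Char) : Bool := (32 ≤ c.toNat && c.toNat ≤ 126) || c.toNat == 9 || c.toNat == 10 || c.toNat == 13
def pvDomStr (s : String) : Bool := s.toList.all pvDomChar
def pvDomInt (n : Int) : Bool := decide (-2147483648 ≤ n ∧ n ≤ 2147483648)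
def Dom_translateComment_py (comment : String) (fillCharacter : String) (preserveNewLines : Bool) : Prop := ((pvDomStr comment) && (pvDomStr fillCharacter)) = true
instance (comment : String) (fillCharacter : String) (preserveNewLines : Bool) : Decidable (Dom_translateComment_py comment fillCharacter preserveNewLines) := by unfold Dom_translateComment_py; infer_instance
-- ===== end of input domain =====

-- B replaces A's per-character conditional append loop by string multiplication
-- (fill * len, per line when newlines are preserved) — objective: simpler.

-- ===== PORT A =====
-- ret = ''; for c in comment: ret += c if (c == '\n' and preserveNewLines) else fillCharacter
def translateComment_py (comment : String) (fillCharacter : String) (preserveNewLines : Bool) : String :=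
  String.mk (comment.toList.foldl
    (fun ret c => ret ++ (if c == '\n' && preserveNewLines then [c] else fillCharacter.toList))
    [])

-- ===== PORT B =====
def translateComment_py_alt (comment : String) (fillCharacter : String) (preserveNewLines : Bool) : String :=
  if !preserveNewLines then
    String.mk (PySem.List.pyRepeat fillCharacter.toList (comment.toList.length : Int))
  else
    String.mk (PySem.Chars.join ['\n']
      ((PySem.Chars.splitOn comment.toList ['\n']).map
        (fun seg => PySem.List.pyRepeat fillCharacter.toList (seg.length : Int))))

-- ===== PRECONDITION & SPEC =====
def Spec_translateComment_py (comment : String) (fillCharacter : String) (preserveNewLines : Bool) (out : String) : Prop := out = translateComment_py_alt comment fillCharacter preserveNewLines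
instance (comment : String) (fillCharacter : String) (preserveNewLines : Bool) (out : String) : Decidable (Spec_translateComment_py comment fillCharacter preserveNewLines out) := by unfold Spec_translateComment_py; infer_instance

-- ===== CLAIM (what is proved, stated in full; the proofs are below) =====
def Claim_equal_translateComment_py : Prop := ∀ (comment : String) (fillCharacter : String) (preserveNewLines : Bool), Dom_translateComment_py comment fillCharacter preserveNewLines → Spec_translateComment_py comment fillCharacter preserveNewLines (translateComment_py comment fillCharacter preserveNewLines)

-- ===== LEMMAS AND PROOFS =====

-- simple structural splitter on a single separator char (proof-only helper)
def pvSplit (d : Char) : List Char → List (List Char)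
  | [] => [[]]
  | c :: rest => if c = d then [] :: pvSplit d rest
                 else match pvSplit d rest with
                      | [] => [[c]]
                      | p :: ps => (c :: p) :: ps

lemma pvSplit_ne_nil (d : Char) (l : List Char) : pvSplit d l ≠ [] := by
  cases l with
  | nil => simp [pvSplit]
  | cons c rest =>
    simp only [pvSplit]
    split_ifs
    · simp
    · cases pvSplit d rest <;> simp

lemma splitOn_go_single (d : Char) (l : List Char) : ∀ (fuel : Nat) (cur : List Char)
    (acc : List (List Char)), l.length ≤ fuel →
    PySem.Chars.splitOn.go [d] fuel l cur acc =
      acc.reverse ++ (match pvSplit d l with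
                      | [] => [cur.reverse]
                      | p :: ps => (cur.reverse ++ p) :: ps) := by
  induction l with
  | nil =>
    intro fuel cur acc _
    cases fuel <;> simp [PySem.Chars.splitOn.go, pvSplit]
  | cons c rest ih =>
    intro fuel cur acc h
    cases fuel with
    | zero => simp at h
    | succ fuel =>
      simp only [PySem.Chars.splitOn.go]
      by_cases hc : c = d
      · have hpre : List.isPrefixOf [d] (c :: rest) = true := by
          simp [List.isPrefixOf, hc]
        rw [if_pos hpre]
        have := ih fuel [] (cur.reverse :: acc) (by simpa using Nat.le_of_succ_le_succ h)
        rw [show List.drop (List.length [d]) (c :: rest) = rest by simp]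
        rw [this]
        simp only [pvSplit, if_pos hc]
        cases hr : pvSplit d rest with
        | nil => exact absurd hr (pvSplit_ne_nil d rest)
        | cons p ps => simp
      · have hpre : List.isPrefixOf [d] (c :: rest) = false := by
          simp [List.isPrefixOf]
          exact fun hh => absurd hh.symm hc
        rw [if_neg (by simp [hpre])]
        have := ih fuel (c :: cur) acc (Nat.le_of_succ_le_succ h)
        rw [this]
        simp only [pvSplit, if_neg hc]
        cases hr : pvSplit d rest with
        | nil => exact absurd hr (pvSplit_ne_nil d rest)
        | cons p ps => simp

lemma splitOn_eq_pvSplit (d : Char) (l : List Char) :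
    PySem.Chars.splitOn l [d] = pvSplit d l := by
  unfold PySem.Chars.splitOn
  rw [splitOn_go_single d l (l.length + 1) [] [] (Nat.le_succ _)]
  cases hr : pvSplit d l with
  | nil => exact absurd hr (pvSplit_ne_nil d l)
  | cons p ps => simp

-- fillCharacter repeated n times
def pvRep (f : List Char) (n : Nat) : List Char := (List.replicate n f).flatten

lemma pyRepeat_natCast (f : List Char) (n : Nat) :
    PySem.List.pyRepeat f (n : Int) = pvRep f n := by
  simp [PySem.List.pyRepeat, pvRep]

lemma pvRep_succ (f : List Char) (n : Nat) : pvRep f (n + 1) = pvRep f n ++ f := by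
  simp [pvRep, List.replicate_succ' (n := n)]

-- A's loop body as a flatMap
lemma foldA (f : List Char) (pres : Bool) (l : List Char) :
    l.foldl (fun ret c => ret ++ (if c == '\n' && pres then [c] else f)) [] =
      l.flatMap (fun c => if c == '\n' && pres then [c] else f) := by
  simpa using PySem.List.foldl_append_eq_flatMap
    (g := fun c => if c == '\n' && pres then [c] else f) (l := l) (acc := [])

lemma flatMap_const_rep (f : List Char) (l : List Char) :
    l.flatMap (fun _ => f) = pvRep f l.length := by
  induction l with
  | nil => simp [pvRep]
  | cons c rest ih => simp [List.flatMap_cons, ih, pvRep, List.replicate_succ]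

lemma join_split (f : List Char) (l : List Char) (pre : Nat) :
    PySem.Chars.join ['\n']
      ((match pvSplit '\n' l with
        | [] => []
        | p :: ps => (pvRep f (pre + p.length)) :: ps.map (fun seg => pvRep f seg.length))) =
      pvRep f pre ++ l.flatMap (fun c => if c == '\n' then [c] else f) := by
  induction l generalizing pre with
  | nil => simp [pvSplit, PySem.Chars.join_singleton]
  | cons c rest ih =>
    by_cases hc : c = '\n'
    · subst hc
      cases hr : pvSplit '\n' rest with
      | nil => exact absurd hr (pvSplit_ne_nil _ rest)
      | cons p ps =>
        have h0 := ih 0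
        rw [hr] at h0
        rw [show pvSplit '\n' ('\n' :: rest) = [] :: p :: ps by simp [pvSplit, hr]]
        simp only [List.length_nil, Nat.add_zero, List.map_cons]
        rw [PySem.Chars.join_cons_cons]
        simp only [Nat.zero_add] at h0
        rw [h0]
        simp [List.flatMap_cons, pvRep]
    · cases hr : pvSplit '\n' rest with
      | nil => exact absurd hr (pvSplit_ne_nil _ rest)
      | cons p ps =>
        have h1 := ih (pre + 1)
        rw [hr] at h1
        rw [show pvSplit '\n' (c :: rest) = (c :: p) :: ps by simp [pvSplit, hc, hr]]
        simp only [List.length_cons]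
        rw [show pre + (p.length + 1) = (pre + 1) + p.length by omega]
        rw [h1]
        have hcb : (c == '\n') = false := by simp [hc]
        simp only [List.flatMap_cons, hcb, Bool.false_eq_true, if_false, pvRep_succ]
        simp

-- ===== VERDICT (by name: the statement is the Claim_ definition above) =====
theorem translateComment_py_spec : Claim_equal_translateComment_py := by
  intro comment fillCharacter pres _
  unfold Spec_translateComment_py translateComment_py translateComment_py_alt
  rw [foldA]
  cases pres with
  | false =>
    simp only [Bool.not_false, if_true]
    rw [pyRepeat_natCast, ← flatMap_const_rep]
    simp
  | true =>
    simp only [Bool.not_true, Bool.false_eq_true, if_false]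
    rw [splitOn_eq_pvSplit]
    have key := join_split fillCharacter.toList comment.toList 0
    cases hr : pvSplit '\n' comment.toList with
    | nil => exact absurd hr (pvSplit_ne_nil _ _)
    | cons p ps =>
      rw [hr] at key
      simp only [Nat.zero_add] at key
      rw [show pvRep fillCharacter.toList 0 = [] from rfl, List.nil_append] at key
      simp only [List.map_cons, pyRepeat_natCast, Bool.and_true]
      rw [key]
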